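-- pv_equiv track=rewrite | github.com/JJundev/algorithm | anlab코테/anlab_1.py | solution
-- ===== SOURCE A (Python) =====
-- def solution(user_times, T):
--     min = []
--     for i in range(len(user_times)):
--         while user_times[i] > T:
--             user_times[i] -= T
--         min.append(T-user_times[i])
--     answer = max(min)
--     return answer
-- ===== SOURCE B (Python) =====
-- def solution(user_times, T):
--     # modulo instead of repeated subtraction; does not mutate user_times
--     return max(T - (x if x <= T else (x - 1) % T + 1) for x in user_times)
-- ===== Notes on version B (the rewrite author's own statement) =====
-- stated objective: faster
-- what changed: replaces the per-element repeated-subtraction while-loop with a single modulo ((x-1)%T+1) and folds the whole computation into one max over a generator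
import Mathlib
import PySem

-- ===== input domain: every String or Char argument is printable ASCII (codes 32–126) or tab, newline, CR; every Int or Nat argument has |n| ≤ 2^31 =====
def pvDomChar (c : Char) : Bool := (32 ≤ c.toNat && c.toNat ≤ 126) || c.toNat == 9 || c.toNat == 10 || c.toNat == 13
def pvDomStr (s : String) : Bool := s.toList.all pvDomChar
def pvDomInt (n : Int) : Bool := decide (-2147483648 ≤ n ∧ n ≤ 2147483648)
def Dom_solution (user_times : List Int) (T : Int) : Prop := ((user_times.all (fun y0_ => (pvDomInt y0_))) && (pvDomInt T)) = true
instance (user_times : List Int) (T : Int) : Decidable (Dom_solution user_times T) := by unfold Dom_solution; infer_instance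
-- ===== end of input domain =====

-- ===== PORT A =====
-- B changes the algorithm (modulo instead of repeated subtraction); A mutates user_times in
-- place in Python — the equivalence proved here is about the RETURN value only.
-- while user_times[i] > T: user_times[i] -= T   (the 'T > 0' conjunct is only the
-- termination guard for Lean; inside Pre_ the loop is entered only when T > 0)
def pyReduce (x T : Int) : Int :=
  if h : T < x ∧ 0 < T then pyReduce (x - T) T else x
termination_by (x - T).toNat
decreasing_by omega

def solution (user_times : List Int) (T : Int) : Int :=
  let min := user_times.foldl (fun acc x => acc ++ [T - pyReduce x T]) []
  (PySem.List.max? min (fun y => y)).getD 0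

-- ===== PORT B =====
def solution_alt (user_times : List Int) (T : Int) : Int :=
  (PySem.List.max?
    (user_times.map (fun x => T - (if x ≤ T then x else PySem.Int.mod (x - 1) T + 1)))
    (fun y => y)).getD 0

-- ===== PRECONDITION & SPEC =====
-- Pre_ excludes the empty list (Python's max([]) raises ValueError) and the inputs where
-- A's while-loop never terminates (some x > T with T ≤ 0).
def Pre_solution (user_times : List Int) (T : Int) : Prop :=
  user_times ≠ [] ∧ (0 < T ∨ ∀ x ∈ user_times, x ≤ T)
instance (user_times : List Int) (T : Int) : Decidable (Pre_solution user_times T) := by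
  unfold Pre_solution; infer_instance
def pvWitness_solution : List Int × Int := ([3, 17, 5], 7)

def Spec_solution (user_times : List Int) (T : Int) (out : Int) : Prop := out = solution_alt user_times T
instance (user_times : List Int) (T : Int) (out : Int) : Decidable (Spec_solution user_times T out) := by unfold Spec_solution; infer_instance

-- ===== CLAIM (what is proved, stated in full; the proofs are below) =====
def Claim_equal_solution : Prop := ∀ (user_times : List Int) (T : Int), Dom_solution user_times T → Pre_solution user_times T → Spec_solution user_times T (solution user_times T)

-- ===== LEMMAS AND PROOFS =====

theorem pyReduce_le {x T : Int} (h : x ≤ T) : pyReduce x T = x := by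
  unfold pyReduce
  simp [show ¬(T < x ∧ 0 < T) by omega]

theorem pyReduce_mod_aux {T : Int} (hT : 0 < T) :
    ∀ n (x : Int), (x - T).toNat = n → T < x →
      pyReduce x T = PySem.Int.mod (x - 1) T + 1 := by
  intro n
  induction n using Nat.strong_induction_on with
  | _ n ih =>
    intro x hn hx
    rw [pyReduce, dif_pos ⟨hx, hT⟩]
    by_cases hx2 : T < x - T
    · rw [ih (x - T - T).toNat (by omega) _ rfl hx2]
      congr 1
      rw [PySem.Int.mod_eq_emod_of_pos hT, PySem.Int.mod_eq_emod_of_pos hT]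
      conv_lhs => rw [show x - T - 1 = (x - 1) + T * (-1) by ring, Int.add_mul_emod_self_left]
    · rw [pyReduce_le (by omega)]
      rw [PySem.Int.mod_eq_emod_of_pos hT]
      have h2 : x - 1 - T < T := by omega
      have h0 : 0 ≤ x - 1 - T := by omega
      have : (x - 1) % T = x - 1 - T := by
        conv_lhs => rw [show x - 1 = (x - 1 - T) + T * 1 by ring, Int.add_mul_emod_self_left]
        exact Int.emod_eq_of_lt h0 h2
      omega

theorem pyReduce_mod {x T : Int} (hT : 0 < T) (hx : T < x) :
    pyReduce x T = PySem.Int.mod (x - 1) T + 1 :=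
  pyReduce_mod_aux hT _ x rfl hx

theorem reduce_eq_branch {x T : Int} (h : 0 < T ∨ x ≤ T) :
    T - pyReduce x T = T - (if x ≤ T then x else PySem.Int.mod (x - 1) T + 1) := by
  by_cases hx : x ≤ T
  · rw [if_pos hx, pyReduce_le hx]
  · rw [if_neg hx, pyReduce_mod (by omega) (by omega)]

theorem foldl_append_map {g : Int → Int} (xs : List Int) (acc : List Int) :
    xs.foldl (fun acc x => acc ++ [g x]) acc = acc ++ xs.map g := by
  induction xs generalizing acc with
  | nil => simp
  | cons h t ih => simp [List.foldl, ih]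

-- ===== VERDICT (by name: the statement is the Claim_ definition above) =====
theorem solution_spec : Claim_equal_solution := by
  intro us T _ hpre
  unfold Spec_solution solution solution_alt
  rw [foldl_append_map]
  have hmap : us.map (fun x => T - pyReduce x T)
      = us.map (fun x => T - (if x ≤ T then x else PySem.Int.mod (x - 1) T + 1)) := by
    apply List.map_congr_left
    intro x hx
    apply reduce_eq_branch
    rcases hpre.2 with h | h
    · exact Or.inl h
    · exact Or.inr (h x hx)
  simp only [List.nil_append, hmap]
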